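-- pv_equiv track=rewrite | github.com/henon-chare/CYBERGUARD7 | alert.py | get_domain_suffixes
-- ===== SOURCE A (Python) =====
-- def get_domain_suffixes(url):
--     """
--     Generates a list of domain suffixes to search for potential parent monitors.
--     e.g. 'lms.courses.bdu.edu.et' -> ['lms.courses.bdu.edu.et', 'courses.bdu.edu.et', 'bdu.edu.et', 'edu.et', 'et']
--     e.g. 'user@example.com' -> ['example.com', 'com'] (Handles username/host format)
--     """
--     try:
--         # Remove protocol and path
--         domain = url.replace("https://", "").replace("http://", "").split("/")[0]
--
--         # FIX: Handle username/host format (e.g., user@example.com)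
--         # If '@' exists, we only care about the host part after it.
--         if '@' in domain:
--             domain = domain.split('@')[-1]
--
--         parts = domain.split(".")
--         suffixes = []
--         for i in range(len(parts)):
--             suffixes.append(".".join(parts[i:]))
--         return suffixes
--     except:
--         return [url]
-- ===== SOURCE B (Python) =====
-- def get_domain_suffixes(url):
--     """Same result as A, built right-to-left with a running suffix accumulator."""
--     try:
--         host = url.replace("https://", "").replace("http://", "").split("/")[0]
--         host = host.split("@")[-1] if "@" in host else host
--         labels = host.split(".")
--         suffixes = []
--         cur = ""
--         for label in reversed(labels):
--             cur = label if not suffixes else label + "." + cur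
--             suffixes.insert(0, cur)
--         return suffixes
--     except:
--         return [url]
-- ===== Notes on version B (the rewrite author's own statement) =====
-- stated objective: alternative
-- what changed: Instead of indexing i over range(len(parts)) and re-joining parts[i:] for every i, B walks the labels once from right to left, extending a running suffix string (label or label+'.'+cur) and prepending each suffix, so the join-per-index inner pass disappears.
import Mathlib
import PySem

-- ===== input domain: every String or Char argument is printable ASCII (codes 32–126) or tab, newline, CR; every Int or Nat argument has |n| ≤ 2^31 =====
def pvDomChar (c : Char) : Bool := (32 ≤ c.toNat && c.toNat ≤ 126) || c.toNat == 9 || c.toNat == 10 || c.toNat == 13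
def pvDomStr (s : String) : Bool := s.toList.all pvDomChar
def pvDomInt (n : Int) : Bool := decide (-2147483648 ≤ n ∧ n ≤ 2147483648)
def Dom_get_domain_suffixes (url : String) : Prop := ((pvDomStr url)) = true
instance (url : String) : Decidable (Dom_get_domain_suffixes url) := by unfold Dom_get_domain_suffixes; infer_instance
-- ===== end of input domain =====

-- B builds the suffix list right-to-left with a running accumulator instead of re-joining
-- parts[i:] for every i (objective: alternative decomposition; return value only, no side effects).

-- ===== PORT A =====
-- A, step for step: strip protocols, take [0] of split("/"), optionally [-1] of split("@"),
-- split on "." and append ".".join(parts[i:]) for i in range(len(parts)); any exception → [url].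
def get_domain_suffixes (url : String) : List String :=
  match PySem.Str.split? (PySem.Str.replace (PySem.Str.replace url "https://" "") "http://" "") "/" with
  | none => [url]
  | some pieces =>
    match PySem.List.pyGet? pieces 0 with
    | none => [url]
    | some domain0 =>
      match (if PySem.Str.isIn "@" domain0 then
               match PySem.Str.split? domain0 "@" with
               | none => none
               | some ps => PySem.List.pyGet? ps (-1)
             else some domain0) with
      | none => [url]
      | some domain =>
        match PySem.Str.split? domain "." with
        | none => [url]
        | some parts =>
          (PySem.List.pyRange 0 (parts.length : Int) 1).foldl
            (fun suffixes i =>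
              suffixes ++ [PySem.Str.join "." (PySem.List.slice parts (some i) none)]) []

-- ===== PORT B =====
-- B's parsing: same values, written as an Option.bind pipeline.
def pvBHost (url : String) : Option String :=
  (PySem.Str.split? (PySem.Str.replace (PySem.Str.replace url "https://" "") "http://" "") "/").bind
    fun pieces => (PySem.List.pyGet? pieces 0).bind
      fun h =>
        if PySem.Str.isIn "@" h then
          (PySem.Str.split? h "@").bind fun ps => PySem.List.pyGet? ps (-1)
        else some h

-- B's loop: fold over the labels from the right, keeping (cur, suffixes); each step prepends.
def pvBSuffixes (labels : List String) : List String :=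
  (labels.reverse.foldl
      (fun st label =>
        let cur := if st.2.isEmpty then label else label ++ "." ++ st.1
        (cur, cur :: st.2))
      ("", [])).2

def get_domain_suffixes_alt (url : String) : List String :=
  match (pvBHost url).bind (fun h => PySem.Str.split? h ".") with
  | none => [url]
  | some labels => pvBSuffixes labels

-- ===== PRECONDITION & SPEC =====
def Spec_get_domain_suffixes (url : String) (out : List String) : Prop := out = get_domain_suffixes_alt url
instance (url : String) (out : List String) : Decidable (Spec_get_domain_suffixes url out) := by unfold Spec_get_domain_suffixes; infer_instance

-- ===== CLAIM (what is proved, stated in full; the proofs are below) =====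
def Claim_equal_get_domain_suffixes : Prop := ∀ (url : String), Dom_get_domain_suffixes url → Spec_get_domain_suffixes url (get_domain_suffixes url)

-- ===== LEMMAS AND PROOFS =====

-- ".".join(p :: rest) splits off its head label.
theorem pvJoin_cons (p : String) (rest : List String) :
    PySem.Str.join "." (p :: rest)
      = if rest.isEmpty then p else p ++ "." ++ PySem.Str.join "." rest := by
  cases rest with
  | nil => simp [PySem.Str.join, PySem.Chars.join_singleton]
  | cons r rs =>
    simp only [List.isEmpty_cons, if_neg Bool.false_ne_true]
    rw [← String.toList_inj]
    simp [PySem.Str.join, PySem.Chars.join_cons_cons]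

-- B's foldr-form state: (".".join(labels), the suffix list A builds for labels)
theorem pvB_foldr_invariant (labels : List String) :
    labels.foldr
        (fun label st =>
          let cur := if st.2.isEmpty then label else label ++ "." ++ st.1
          (cur, cur :: st.2))
        (("", []) : String × List String)
      = (PySem.Str.join "." labels,
         (List.range labels.length).map (fun k => PySem.Str.join "." (labels.drop k))) := by
  induction labels with
  | nil => simp [PySem.Str.join, PySem.Chars.join, List.intercalate]
  | cons p rest ih =>
    have hcur : (if ((List.range rest.length).map
          (fun k => PySem.Str.join "." (rest.drop k))).isEmpty then p
          else p ++ "." ++ PySem.Str.join "." rest) = PySem.Str.join "." (p :: rest) := by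
      rw [pvJoin_cons]
      cases rest <;> simp
    simp only [List.foldr_cons, ih, hcur]
    simp only [List.length_cons, List.range_succ_eq_map,
      List.map_cons, List.map_map, List.drop_zero, Function.comp_def, List.drop_succ_cons]

-- A's indexed loop over range(len(labels)) equals B's right-to-left accumulator.
theorem pvB_core (labels : List String) :
    (PySem.List.pyRange 0 (labels.length : Int) 1).foldl
        (fun suffixes i =>
          suffixes ++ [PySem.Str.join "." (PySem.List.slice labels (some i) none)]) []
      = pvBSuffixes labels := by
  rw [PySem.List.foldl_append_singleton_eq_map, PySem.List.pyRange_zero_natCast,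
    List.map_map]
  unfold pvBSuffixes
  rw [List.foldl_reverse]
  rw [show (fun (x : String) (st : String × List String) =>
        (fun (st : String × List String) (label : String) =>
          let cur := if st.2.isEmpty then label else label ++ "." ++ st.1
          (cur, cur :: st.2)) st x)
      = (fun (label : String) (st : String × List String) =>
          let cur := if st.2.isEmpty then label else label ++ "." ++ st.1
          (cur, cur :: st.2)) from rfl]
  rw [pvB_foldr_invariant]
  apply List.map_congr_left
  intro k hk
  simp only [Function.comp_apply, PySem.List.slice_from_natCast]

-- ===== VERDICT (by name: the statement is the Claim_ definition above) =====
theorem get_domain_suffixes_spec : Claim_equal_get_domain_suffixes := by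
  intro url _
  unfold Spec_get_domain_suffixes get_domain_suffixes get_domain_suffixes_alt pvBHost
  cases h1 : PySem.Str.split? (PySem.Str.replace (PySem.Str.replace url "https://" "") "http://" "") "/" with
  | none => rfl
  | some pieces =>
    cases h2 : PySem.List.pyGet? pieces 0 with
    | none => simp [h2]
    | some domain0 =>
      simp only [h2, Option.bind_some]
      cases hAt : PySem.Str.isIn "@" domain0 with
      | false =>
        simp only [Bool.false_eq_true, if_false]
        simp only [Option.bind_some]
        cases h5 : PySem.Str.split? domain0 "." with
        | none => rfl
        | some labels => exact pvB_core labels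
      | true =>
        simp only [if_true]
        cases h3 : PySem.Str.split? domain0 "@" with
        | none => rfl
        | some ps =>
          simp only [Option.bind_some]
          cases h4 : PySem.List.pyGet? ps (-1) with
          | none => rfl
          | some domain =>
            simp only [Option.bind_some]
            cases h5 : PySem.Str.split? domain "." with
            | none => rfl
            | some labels => exact pvB_core labels
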